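-- pv_equiv track=rewrite | github.com/romedikc/Leetcoding | codesignal/find_pairs.py | solution
-- ===== SOURCE A (Python) =====
-- def solution(numbers):
--     if len(numbers) == 1:
--         return 1
--     output = 0
--     subarrays = []
--     for i in range(len(numbers)):
--         for j in range(i + 1, len(numbers)):
--             subarrays.append([numbers[i], numbers[j]])
--     for i in subarrays:
--         s = sum(i)
--         if s % 2 == 0:
--             output += s
--     return output - 1
-- ===== SOURCE B (Python) =====
-- def solution(numbers):
--     if len(numbers) == 1:
--         return 1
--     even_cnt = odd_cnt = 0
--     even_tot = odd_tot = 0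
--     for x in numbers:
--         if x % 2 == 0:
--             even_cnt += 1
--             even_tot += x
--         else:
--             odd_cnt += 1
--             odd_tot += x
--     return even_tot * (even_cnt - 1) + odd_tot * (odd_cnt - 1) - 1
-- ===== Notes on version B (the rewrite author's own statement) =====
-- stated objective: faster
-- what changed: Replaces the O(n^2) materialisation of all index pairs with one pass that keeps count and sum per parity class; each element x contributes x*(count(parity(x))-1) to the total of equal-parity pair sums.
import Mathlib
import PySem

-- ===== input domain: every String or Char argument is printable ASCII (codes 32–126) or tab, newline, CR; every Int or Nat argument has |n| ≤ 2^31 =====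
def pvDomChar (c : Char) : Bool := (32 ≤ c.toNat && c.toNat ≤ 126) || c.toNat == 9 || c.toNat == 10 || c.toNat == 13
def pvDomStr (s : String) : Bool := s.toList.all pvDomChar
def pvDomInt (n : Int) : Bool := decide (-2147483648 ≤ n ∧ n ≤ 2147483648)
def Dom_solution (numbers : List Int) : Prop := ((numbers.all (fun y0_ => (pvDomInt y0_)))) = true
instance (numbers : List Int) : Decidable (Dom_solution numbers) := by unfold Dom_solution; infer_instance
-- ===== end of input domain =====

-- B replaces A's quadratic enumeration of all index pairs by one linear pass keeping
-- count and sum per parity class (objective: faster, asymptotic).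

-- ===== PORT A =====
def solution (numbers : List Int) : Int :=
  if numbers.length = 1 then 1
  else
    let subarrays : List (List Int) :=
      (PySem.List.pyRange 0 (numbers.length : Int) 1).foldl (fun acc i =>
        (PySem.List.pyRange (i + 1) (numbers.length : Int) 1).foldl (fun acc2 j =>
          acc2 ++ [[PySem.List.pyGetD numbers i 0, PySem.List.pyGetD numbers j 0]]) acc) []
    let output : Int := subarrays.foldl (fun output i =>
      let s := i.foldl (· + ·) 0
      if PySem.Int.mod s 2 = 0 then output + s else output) 0
    output - 1

-- ===== PORT B =====
-- state = (even_cnt, odd_cnt, even_tot, odd_tot)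
def solution_alt (numbers : List Int) : Int :=
  if numbers.length = 1 then 1
  else
    let st := numbers.foldl (fun (st : Int × Int × Int × Int) x =>
      if PySem.Int.mod x 2 = 0 then (st.1 + 1, st.2.1, st.2.2.1 + x, st.2.2.2)
      else (st.1, st.2.1 + 1, st.2.2.1, st.2.2.2 + x)) (0, 0, 0, 0)
    st.2.2.1 * (st.1 - 1) + st.2.2.2 * (st.2.1 - 1) - 1

-- ===== PRECONDITION & SPEC =====
def Spec_solution (numbers : List Int) (out : Int) : Prop := out = solution_alt numbers
instance (numbers : List Int) (out : Int) : Decidable (Spec_solution numbers out) := by unfold Spec_solution; infer_instance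

-- ===== CLAIM (what is proved, stated in full; the proofs are below) =====
def Claim_equal_solution : Prop := ∀ (numbers : List Int), Dom_solution numbers → Spec_solution numbers (solution numbers)

-- ===== LEMMAS AND PROOFS =====

/-- The list of all ordered pairs `[l_i, l_j]`, `i < j`, built structurally. -/
def pairsOf : List Int → List (List Int)
  | [] => []
  | x :: xs => xs.map (fun y => [x, y]) ++ pairsOf xs

def cntE (l : List Int) : Int := (l.countP (fun x => decide (x % 2 = 0)) : Int)
def cntO (l : List Int) : Int := (l.countP (fun x => decide (x % 2 ≠ 0)) : Int)
def sumE (l : List Int) : Int := (l.filter (fun x => decide (x % 2 = 0))).sum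
def sumO (l : List Int) : Int := (l.filter (fun x => decide (x % 2 ≠ 0))).sum

lemma map_getD_range (l : List Int) :
    (List.range l.length).map (fun k => l.getD k 0) = l := by
  induction l with
  | nil => rfl
  | cons x xs ih =>
    simp [List.range_succ_eq_map, List.map_map, Function.comp_def] at *
    exact ih

/-- A's nested index loops produce exactly `pairsOf l` (Nat-indexed form). -/
lemma natPairs_eq (l : List Int) :
    (List.range l.length).flatMap
      (fun i => (List.range (l.length - (i + 1))).map
        (fun k => [l.getD i 0, l.getD (i + 1 + k) 0])) = pairsOf l := by
  induction l with
  | nil => rfl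
  | cons x xs ih =>
    rw [List.length_cons, List.range_succ_eq_map, List.flatMap_cons, List.flatMap_map]
    congr 1
    · simp only [Nat.add_sub_cancel, List.getD_cons_zero]
      have hsh : ∀ k, (x :: xs).getD (0 + 1 + k) 0 = xs.getD k 0 := by
        intro k
        have : 0 + 1 + k = k + 1 := by omega
        rw [this, List.getD_cons_succ]
      calc (List.range xs.length).map (fun k => [x, (x :: xs).getD (0 + 1 + k) 0])
          = (List.range xs.length).map ((fun y => [x, y]) ∘ (fun k => xs.getD k 0)) := by
            exact List.map_congr_left (fun k _ => by rw [Function.comp_apply, hsh k])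
        _ = ((List.range xs.length).map (fun k => xs.getD k 0)).map (fun y => [x, y]) := by
            rw [List.map_map]
        _ = xs.map (fun y => [x, y]) := by rw [map_getD_range]
    · rw [← ih]
      apply List.flatMap_congr  -- may not exist; fallback below
      intro i _
      simp [Nat.succ_sub_succ, Nat.add_right_comm]

/-- Weighted sum of pairs with head `x` over `xs`. -/
lemma mapW_sum (x : Int) (xs : List Int) :
    (xs.map (fun y => if (x + y) % 2 = 0 then x + y else 0)).sum
      = (if x % 2 = 0 then x * cntE xs + sumE xs else x * cntO xs + sumO xs) := by
  induction xs with
  | nil => simp [cntE, cntO, sumE, sumO]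
  | cons y ys ih =>
    simp only [List.map_cons, List.sum_cons, ih, cntE, cntO, sumE, sumO,
      List.countP_cons, List.filter_cons]
    have h1 : (x + y) % 2 = 0 ↔ x % 2 = y % 2 := by omega
    by_cases hx : x % 2 = 0 <;> by_cases hy : y % 2 = 0 <;>
      simp [hx, hy, h1] <;> ring_nf <;> omega

lemma cntE_cons (x : Int) (xs : List Int) :
    cntE (x :: xs) = cntE xs + (if x % 2 = 0 then 1 else 0) := by
  simp only [cntE, List.countP_cons]
  by_cases hx : x % 2 = 0 <;> simp [hx]

lemma cntO_cons (x : Int) (xs : List Int) :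
    cntO (x :: xs) = cntO xs + (if x % 2 = 0 then 0 else 1) := by
  simp only [cntO, List.countP_cons]
  by_cases hx : x % 2 = 0 <;> simp [hx]

lemma sumE_cons (x : Int) (xs : List Int) :
    sumE (x :: xs) = (if x % 2 = 0 then x else 0) + sumE xs := by
  simp only [sumE, List.filter_cons]
  by_cases hx : x % 2 = 0 <;> simp [hx]

lemma sumO_cons (x : Int) (xs : List Int) :
    sumO (x :: xs) = (if x % 2 = 0 then 0 else x) + sumO xs := by
  simp only [sumO, List.filter_cons]
  by_cases hx : x % 2 = 0 <;> simp [hx]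

/-- A's nested loops over `pyRange`, in `pairsOf` form. -/
lemma pyPairs_eq (l : List Int) :
    (PySem.List.pyRange 0 (l.length : Int) 1).flatMap (fun i =>
      (PySem.List.pyRange (i + 1) (l.length : Int) 1).map
        (fun j => [PySem.List.pyGetD l i 0, PySem.List.pyGetD l j 0])) = pairsOf l := by
  rw [← natPairs_eq l, PySem.List.pyRange_zero_nat, List.flatMap_map]
  apply List.flatMap_congr
  intro i hi
  rw [PySem.List.pyRange_one, List.map_map, PySem.List.pyGetD_natCast]
  have hlen : (((l.length : Nat) : Int) - ((i : Int) + 1)).toNat = l.length - (i + 1) := by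
    omega
  rw [hlen]
  apply List.map_congr_left
  intro k _
  simp only [Function.comp_apply]
  have hcast : ((i : Int) + 1 + (k : Int)) = ((i + 1 + k : Nat) : Int) := by push_cast; ring
  rw [hcast, PySem.List.pyGetD_natCast]

/-- One outer-loop stripe of A's accumulation loop. -/
lemma mapx_fold (x : Int) (xs : List Int) (o : Int) :
    (xs.map (fun y => [x, y])).foldl (fun output i =>
        let s := i.foldl (· + ·) 0
        if PySem.Int.mod s 2 = 0 then output + s else output) o
      = o + (xs.map (fun y => if (x + y) % 2 = 0 then x + y else 0)).sum := by
  induction xs generalizing o with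
  | nil => simp
  | cons y ys ih =>
    have hm : PySem.Int.mod (0 + x + y) 2 = (x + y) % 2 := by
      rw [PySem.Int.mod_eq_emod_of_pos (by norm_num)]; ring_nf
    simp only [List.map_cons, List.foldl_cons, List.sum_cons, List.foldl_nil]
    rw [ih]
    by_cases h : (x + y) % 2 = 0 <;> simp only [hm, h, if_true, if_false] <;> ring

/-- Value of A's accumulation loop over `pairsOf l`, closed form. -/
lemma pairs_fold_eq (l : List Int) (o : Int) :
    (pairsOf l).foldl (fun output i =>
        let s := i.foldl (· + ·) 0
        if PySem.Int.mod s 2 = 0 then output + s else output) o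
      = o + (sumE l * (cntE l - 1) + sumO l * (cntO l - 1)) := by
  induction l generalizing o with
  | nil => simp [pairsOf, sumE, sumO, cntE, cntO]
  | cons x xs ih =>
    simp only [pairsOf, List.foldl_append]
    rw [mapx_fold, ih, mapW_sum, cntE_cons, cntO_cons, sumE_cons, sumO_cons]
    by_cases hx : x % 2 = 0 <;>
      simp only [hx, if_true, if_false] <;> ring

/-- B's fold invariant. -/
lemma b_fold (l : List Int) (ce co te td : Int) :
    l.foldl (fun (st : Int × Int × Int × Int) x =>
      if PySem.Int.mod x 2 = 0 then (st.1 + 1, st.2.1, st.2.2.1 + x, st.2.2.2)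
      else (st.1, st.2.1 + 1, st.2.2.1, st.2.2.2 + x)) (ce, co, te, td)
      = (ce + cntE l, co + cntO l, te + sumE l, td + sumO l) := by
  induction l generalizing ce co te td with
  | nil => simp [cntE, cntO, sumE, sumO]
  | cons x xs ih =>
    have hm : PySem.Int.mod x 2 = x % 2 := PySem.Int.mod_eq_emod_of_pos (by norm_num)
    by_cases hx : x % 2 = 0 <;>
      simp only [List.foldl_cons, hm, hx, if_true, if_false] <;>
      rw [ih] <;>
      simp only [cntE_cons, cntO_cons, sumE_cons, sumO_cons, hx, if_true, if_false,
        Prod.mk.injEq] <;>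
      refine ⟨by omega, by omega, by omega, by omega⟩

-- ===== VERDICT (by name: the statement is the Claim_ definition above) =====
theorem solution_spec : Claim_equal_solution := by
  intro numbers _
  unfold Spec_solution solution solution_alt
  by_cases h : numbers.length = 1
  · simp [h]
  · simp only [h, if_false]
    rw [b_fold]
    simp only [PySem.List.foldl_append_singleton_eq_map, PySem.List.foldl_append_eq_flatMap,
      List.nil_append]
    rw [pyPairs_eq, pairs_fold_eq]
    ring
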